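-- pv_equiv track=rewrite | github.com/KYUSEONGHAN/Development | 하루에 한개씩 문제 풀기/Python/SW Expert Academy/D2/1926. 간단한 369게임.py | solve
-- ===== SOURCE A (Python) =====
-- def solve(n: int) -> list:
--     nums = [str(x) for x in range(1, n+1)]
--
--     for x in range(n):
--         trans = ''
--         for y in nums[x]:
--             if y in ['3', '6', '9']:
--                 trans += '-'
--                 nums[x] = trans
--
--     return nums
-- ===== SOURCE B (Python) =====
-- def solve(n: int) -> list:
--     res = []
--     x = 1
--     while x <= n:
--         t, c = x, 0
--         while t > 0:
--             if t % 10 in (3, 6, 9):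
--                 c += 1
--             t //= 10
--         res.append('-' * c if c else str(x))
--         x += 1
--     return res
-- ===== Notes on version B (the rewrite author's own statement) =====
-- stated objective: alternative
-- what changed: B replaces A's build-then-mutate scheme (materialise all of str(1..n), then rewrite list slots in a nested loop over each number's string while growing a dash accumulator) with a single accumulating pass that extracts each number's decimal digits arithmetically (t % 10, t //= 10), counts those in {3,6,9}, and appends '-'*count or str(x) directly.
import Mathlib
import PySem

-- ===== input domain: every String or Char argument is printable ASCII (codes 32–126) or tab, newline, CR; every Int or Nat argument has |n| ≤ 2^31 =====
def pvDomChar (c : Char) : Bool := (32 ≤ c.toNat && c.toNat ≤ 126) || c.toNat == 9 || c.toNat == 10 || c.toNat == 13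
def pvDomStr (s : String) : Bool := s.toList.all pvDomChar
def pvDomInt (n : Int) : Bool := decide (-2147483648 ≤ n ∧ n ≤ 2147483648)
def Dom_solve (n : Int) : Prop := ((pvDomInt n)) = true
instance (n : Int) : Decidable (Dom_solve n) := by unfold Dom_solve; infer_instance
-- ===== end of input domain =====

-- B re-implements the 369 game by extracting each number's digits arithmetically (t % 10, t //= 10)
-- in one accumulating pass, instead of A's build-all-strings-then-mutate-slots nested loop (objective: alternative).

-- ===== PORT A =====
-- inner loop body: 'if y in ['3','6','9']: trans += '-'; nums[x] = trans'  (state = (trans, nums))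
def solveStep (x : Int) (st : List Char × List String) (y : Char) : List Char × List String :=
  if y = '3' ∨ y = '6' ∨ y = '9' then
    ((st.1 ++ ['-']), PySem.List.pySetD st.2 x (String.mk (st.1 ++ ['-'])))
  else st

def solve (n : Int) : List String :=
  -- nums = [str(x) for x in range(1, n+1)], then the outer for-loop folds over range(n)
  (PySem.List.pyRange 0 n 1).foldl
    (fun nums x =>
      ((String.toList (PySem.List.pyGetD nums x "")).foldl (solveStep x) ([], nums)).2)
    ((PySem.List.pyRange 1 (n + 1) 1).map PySem.Int.toStr)

-- ===== PORT B =====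
-- 'while t > 0: if t % 10 in (3,6,9): c += 1; t //= 10'
-- (counted loop: t //= 10 strictly shrinks a positive t, so t.toNat iterations always suffice)
def count369Aux : Nat → Int → Int
  | 0, _ => 0
  | fuel + 1, t =>
    if 0 < t then
      (if PySem.Int.mod t 10 = 3 ∨ PySem.Int.mod t 10 = 6 ∨ PySem.Int.mod t 10 = 9 then 1 else 0)
        + count369Aux fuel (PySem.Int.floordiv t 10)
    else 0

def count369 (t : Int) : Int := count369Aux t.toNat t

-- 'while x <= n: … res.append('-'*c if c else str(x)); x += 1'  (runs exactly n.toNat times from x = 1)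
-- ('-' * c is String.mk (List.replicate c.toNat '-'): exact for the c ≥ 0 produced by the count)
def solveAltLoop : Nat → Int → List String
  | 0, _ => []
  | m + 1, x =>
    (if count369 x ≠ 0 then String.mk (List.replicate (count369 x).toNat '-')
     else PySem.Int.toStr x) :: solveAltLoop m (x + 1)

def solve_alt (n : Int) : List String := solveAltLoop n.toNat 1

-- ===== PRECONDITION & SPEC =====
def Spec_solve (n : Int) (out : List String) : Prop := out = solve_alt n
instance (n : Int) (out : List String) : Decidable (Spec_solve n out) := by unfold Spec_solve; infer_instance

-- ===== CLAIM (what is proved, stated in full; the proofs are below) =====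
def Claim_equal_solve : Prop := ∀ (n : Int), Dom_solve n → Spec_solve n (solve n)

-- ===== LEMMAS AND PROOFS =====

/-- number of 3/6/9 characters in a digit string -/
def cnt369 (cs : List Char) : Nat := cs.countP (fun y => decide (y = '3' ∨ y = '6' ∨ y = '9'))

/-- the per-entry transform A performs on one slot -/
def g369 (s : String) : String :=
  if cnt369 s.toList = 0 then s else String.mk (List.replicate (cnt369 s.toList) '-')

theorem pySetD_pySetD {α : Type} (xs : List α) (i : Int) (v w : α) :
    PySem.List.pySetD (PySem.List.pySetD xs i v) i w = PySem.List.pySetD xs i w := by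
  unfold PySem.List.pySetD PySem.List.pySet?
  cases h : PySem.List.pyIdx? xs.length i with
  | none => simp [h]
  | some k => simp [h, List.length_set]

theorem inner_fold (x : Int) :
    ∀ (cs : List Char) (trans : List Char) (nums : List String),
      (cs.foldl (solveStep x) (trans, nums)).2 =
        if cnt369 cs = 0 then nums
        else PySem.List.pySetD nums x (String.mk (trans ++ List.replicate (cnt369 cs) '-')) := by
  intro cs
  induction cs with
  | nil => intro trans nums; simp [cnt369]
  | cons c cs ih =>
    intro trans nums
    by_cases hc : c = '3' ∨ c = '6' ∨ c = '9'
    · have hcnt : cnt369 (c :: cs) = cnt369 cs + 1 := by simp [cnt369, hc]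
      simp only [List.foldl_cons, solveStep, if_pos hc, ih, hcnt]
      by_cases h0 : cnt369 cs = 0
      · simp [h0]
      · rw [if_neg h0, if_neg (by omega), pySetD_pySetD]
        have harr : trans ++ ['-'] ++ List.replicate (cnt369 cs) '-'
            = trans ++ List.replicate (cnt369 cs + 1) '-' := by
          simp [List.replicate_succ, List.append_assoc]
        rw [harr]
    · have hcnt : cnt369 (c :: cs) = cnt369 cs := by simp [cnt369, hc]
      simp only [List.foldl_cons, solveStep, if_neg hc, ih, hcnt]

theorem outer_fold :
    ∀ (suf pre : List String),
      (List.range' pre.length suf.length).foldl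
        (fun (nums : List String) (k : Nat) =>
          ((String.toList (PySem.List.pyGetD nums ((k : Nat) : Int) "")).foldl
            (solveStep ((k : Nat) : Int)) ([], nums)).2)
        (pre ++ suf) = pre ++ suf.map g369 := by
  intro suf
  induction suf with
  | nil => intro pre; simp
  | cons s suf ih =>
    intro pre
    rw [List.length_cons, List.range'_succ, List.foldl_cons]
    have hget : PySem.List.pyGetD (pre ++ s :: suf) ((pre.length : Nat) : Int) "" = s := by
      rw [PySem.List.pyGetD_natCast]
      simp [List.getD]
    rw [hget, inner_fold]
    by_cases h0 : cnt369 (String.toList s) = 0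
    · rw [if_pos h0]
      have hg : g369 s = s := by unfold g369; rw [if_pos h0]
      have := ih (pre ++ [s])
      simpa [hg, List.append_assoc] using this
    · rw [if_neg h0, PySem.List.pySetD_natCast]
      have hset : (pre ++ s :: suf).set pre.length
          (String.mk ([] ++ List.replicate (cnt369 (String.toList s)) '-')) =
          pre ++ g369 s :: suf := by
        rw [List.set_append_right _ _ (Nat.le_refl _)]
        have : (s :: suf).set (pre.length - pre.length)
            (String.mk ([] ++ List.replicate (cnt369 s.toList) '-')) = g369 s :: suf := by
          rw [Nat.sub_self, List.set_cons_zero, List.nil_append]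
          unfold g369
          rw [if_neg h0]
        rw [this]
      rw [hset]
      have := ih (pre ++ [g369 s])
      simpa [List.append_assoc] using this

theorem digitChar_369 (d : Nat) (hd : d < 10) :
    (decide (Nat.digitChar d = '3' ∨ Nat.digitChar d = '6' ∨ Nat.digitChar d = '9')) =
      decide (d = 3 ∨ d = 6 ∨ d = 9) := by
  interval_cases d <;> decide

theorem count369Aux_zero (f : Nat) : count369Aux f 0 = 0 := by
  cases f <;> simp [count369Aux]

theorem count369Aux_eq : ∀ (t : Nat), 0 < t → ∀ (f : Nat), t ≤ f →
    count369Aux f (t : Int) = (cnt369 (Nat.toDigits 10 t) : Int) := by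
  intro t
  induction t using Nat.strong_induction_on with
  | _ t ih =>
    intro ht f hf
    obtain ⟨f', rfl⟩ : ∃ f', f = f' + 1 := ⟨f - 1, by omega⟩
    rw [count369Aux, if_pos (by exact_mod_cast ht)]
    have hmod : PySem.Int.mod (t : Int) 10 = ((t % 10 : Nat) : Int) := by
      exact_mod_cast PySem.Int.mod_natCast t 10
    have hdiv : PySem.Int.floordiv (t : Int) 10 = ((t / 10 : Nat) : Int) := by
      exact_mod_cast PySem.Int.floordiv_natCast t 10
    have hcond : (PySem.Int.mod (t : Int) 10 = 3 ∨ PySem.Int.mod (t : Int) 10 = 6 ∨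
        PySem.Int.mod (t : Int) 10 = 9) ↔ (t % 10 = 3 ∨ t % 10 = 6 ∨ t % 10 = 9) := by
      rw [hmod]; constructor <;> (intro h; rcases h with h | h | h) <;> omega
    by_cases hlt : t < 10
    · rw [Nat.toDigits_of_lt_base hlt]
      have hdz : t / 10 = 0 := Nat.div_eq_of_lt hlt
      have hmz : t % 10 = t := Nat.mod_eq_of_lt hlt
      rw [hdiv, hdz]
      rw [Nat.cast_zero, count369Aux_zero]
      have hdc := digitChar_369 t hlt
      simp only [cnt369, List.countP_cons, List.countP_nil, hdc, hmz] at *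
      by_cases h369 : t = 3 ∨ t = 6 ∨ t = 9
      · rw [if_pos (hcond.mpr (by omega))]
        simp [h369]
      · rw [if_neg (fun h => h369 (by have := hcond.mp h; omega))]
        simp [h369]
    · have hge : 10 ≤ t := by omega
      rw [Nat.toDigits_of_base_le (by norm_num) hge]
      have hdpos : 0 < t / 10 := Nat.div_pos hge (by norm_num)
      have hrec := ih (t / 10) (Nat.div_lt_self ht (by norm_num)) hdpos f' (by omega)
      rw [hdiv, hrec]
      have hdc := digitChar_369 (t % 10) (Nat.mod_lt _ (by norm_num))
      simp only [cnt369, List.countP_append, List.countP_cons, List.countP_nil, hdc]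
      by_cases h369 : t % 10 = 3 ∨ t % 10 = 6 ∨ t % 10 = 9
      · rw [if_pos (hcond.mpr h369)]
        simp [h369]
        omega
      · rw [if_neg (fun h => h369 (hcond.mp h))]
        simp [h369]

theorem count369_toDigits (t : Nat) (ht : 0 < t) :
    count369 (t : Int) = (cnt369 (Nat.toDigits 10 t) : Int) := by
  unfold count369
  rw [Int.toNat_natCast]
  exact count369Aux_eq t ht t (Nat.le_refl t)

/-- the per-element value B produces -/
def fB (x : Int) : String :=
  if count369 x ≠ 0 then String.mk (List.replicate (count369 x).toNat '-') else PySem.Int.toStr x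

theorem solveAltLoop_eq : ∀ (m : Nat) (x : Int),
    solveAltLoop m x = (List.range m).map (fun (k : Nat) => fB (x + (k : Int))) := by
  intro m
  induction m with
  | zero =>
    intro x
    rw [solveAltLoop, List.range_zero, List.map_nil]
  | succ m ih =>
    intro x
    rw [solveAltLoop, ih (x + 1)]
    rw [List.range_succ_eq_map, List.map_cons, List.map_map]
    congr 1
    · by_cases hc : count369 x = 0 <;> simp [fB, hc]
    · apply List.map_congr_left
      intro k _
      simp only [Function.comp]
      congr 1
      push_cast
      ring

theorem fB_eq_g369 (t : Nat) (ht : 0 < t) : fB (t : Int) = g369 (PySem.Int.toStr (t : Int)) := by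
  have hcnt := count369_toDigits t ht
  have htoList : (PySem.Int.toStr (t : Int)).toList = Nat.toDigits 10 t := by
    rw [PySem.Int.toList_toStr]
    unfold PySem.Int.toChars
    rw [if_neg (by omega), Int.toNat_natCast]
  unfold fB g369
  rw [htoList, hcnt]
  by_cases h0 : cnt369 (Nat.toDigits 10 t) = 0
  · simp [h0]
  · rw [if_pos (by exact_mod_cast h0), if_neg h0, Int.toNat_natCast]

-- ===== VERDICT (by name: the statement is the Claim_ definition above) =====
theorem solve_spec : Claim_equal_solve := by
  intro n _
  unfold Spec_solve solve solve_alt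
  by_cases hn : n ≤ 0
  · have h0 : n.toNat = 0 := by omega
    rw [h0, solveAltLoop]
    rw [PySem.List.pyRange_one 1 (n + 1), PySem.List.pyRange_one 0 n]
    have h1 : (n + 1 - 1).toNat = 0 := by omega
    have h2 : (n - 0).toNat = 0 := by omega
    rw [h1, h2]
    simp
  · replace hn : 0 < n := by omega
    set m := n.toNat with hm
    have hnm : n = (m : Int) := by omega
    rw [PySem.List.pyRange_one 1 (n + 1), PySem.List.pyRange_one 0 n]
    have h1 : (n + 1 - 1).toNat = m := by omega
    have h2 : (n - 0).toNat = m := by omega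
    rw [h1, h2]
    -- A side: rewrite into a range' fold over the list of strings
    have hzero : (List.range m).map (fun k : Nat => (0 : Int) + (k : Int)) =
        (List.range m).map (fun k : Nat => ((k : Nat) : Int)) := by
      apply List.map_congr_left; intro k _; omega
    rw [hzero, List.map_map, List.foldl_map]
    set nums := (List.range m).map (PySem.Int.toStr ∘ fun k : Nat => 1 + (k : Int)) with hnums
    have hlen : nums.length = m := by simp [hnums]
    have houter := outer_fold nums []
    simp only [List.nil_append, List.length_nil, hlen, ← List.range_eq_range'] at houter
    rw [houter]
    -- B side
    rw [solveAltLoop_eq m 1]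
    rw [hnums, List.map_map]
    apply List.map_congr_left
    intro k _
    simp only [Function.comp]
    have : (1 : Int) + (k : Int) = ((k + 1 : Nat) : Int) := by push_cast; ring
    rw [this, ← fB_eq_g369 (k + 1) (by omega)]
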